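-- pv_equiv track=rewrite | github.com/Spirit-Hat/PracticArticleLog | utils/pdf_utils.py | format_and_clean_text
-- ===== SOURCE A (Python) =====
-- def format_and_clean_text(input_text, format_text=True):
--     if not input_text:
--         return ""
--     lines = input_text.strip().split("\n")
--     formatted_lines = []
--     capitalize_flag = False
--     for index, line in enumerate(lines, start=0):
--         line = line.strip()
--
--         if format_text:
--             if capitalize_flag or index == 0:
--                 line = line.capitalize()
--             else:
--                 line = line.lower()
--
--         capitalize_flag = line.endswith(".")
--         formatted_lines.append(line)
--
--     return " ".join(formatted_lines)
-- ===== SOURCE B (Python) =====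
-- def format_and_clean_text(input_text, format_text=True):
--     stripped = [l.strip() for l in input_text.strip().split("\n")]
--     if not format_text:
--         return " ".join(stripped)
--     # Stage 1: partition the lines into sentence segments; a segment closes
--     # when its last line ends with a period.
--     segments = []
--     cur = []
--     for line in stripped:
--         cur.append(line)
--         if line.endswith("."):
--             segments.append(cur)
--             cur = []
--     if cur:
--         segments.append(cur)
--     # Stage 2: format each segment as a unit and flatten.
--     out = []
--     for seg in segments:
--         out.append(seg[0].capitalize())
--         out.extend(l.lower() for l in seg[1:])
--     return " ".join(out)
-- ===== Notes on version B (the rewrite author's own statement) =====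
-- stated objective: alternative
-- what changed: Replaces A's single stateful scan (running capitalize_flag) with a staged group-then-map algorithm: the stripped lines are first partitioned into sentence segments (each segment ends at a line ending in a period), then each segment is formatted as a unit (head capitalized, tail lowercased) and flattened; sound because case-mapping never changes a trailing period, and A's empty-input guard is subsumed since the empty string yields one empty segment whose join is again empty.
import Mathlib
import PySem

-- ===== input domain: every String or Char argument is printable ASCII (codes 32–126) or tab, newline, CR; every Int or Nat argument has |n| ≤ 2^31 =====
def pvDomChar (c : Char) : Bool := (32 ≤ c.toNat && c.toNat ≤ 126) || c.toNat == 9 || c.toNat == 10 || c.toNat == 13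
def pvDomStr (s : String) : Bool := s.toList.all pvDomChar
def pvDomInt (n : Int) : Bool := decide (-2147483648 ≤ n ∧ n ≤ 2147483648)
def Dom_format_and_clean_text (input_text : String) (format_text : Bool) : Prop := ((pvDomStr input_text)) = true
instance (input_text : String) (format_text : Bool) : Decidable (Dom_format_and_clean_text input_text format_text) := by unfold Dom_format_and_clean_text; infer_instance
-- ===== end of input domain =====

-- B replaces A's stateful per-line scan by a staged group-then-map algorithm
-- (partition the stripped lines into sentence segments ending at a '.'-line,
-- then format each segment: head capitalized, tail lowered); objective:
-- alternative. A is total; equivalence proved on all of Dom.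

-- str.capitalize(): first char uppercased, the rest lowered (exact on ASCII)
def pyCapitalize (s : String) : String :=
  match s.toList with
  | [] => ""
  | c :: rest => String.ofList (PySem.Chars.upperChar c :: PySem.Chars.lower rest)

-- ===== PORT A =====
-- the for-loop over enumerate(lines) with state (index, capitalize_flag); append becomes cons
def loopA (format_text : Bool) : List String → Int → Bool → List String
  | [], _, _ => []
  | l :: rest, index, capitalize_flag =>
    let line := PySem.Str.strip l
    let line := if format_text then
        (if capitalize_flag || index == 0 then pyCapitalize line else PySem.Str.lower line)
      else line
    line :: loopA format_text rest (index + 1) (PySem.Str.endswith line ".")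

def format_and_clean_text (input_text : String) (format_text : Bool) : String :=
  if input_text == "" then ""
  else
    let lines := (PySem.Str.split? (PySem.Str.strip input_text) "\n").getD []
    PySem.Str.join " " (loopA format_text lines 0 false)

-- ===== PORT B =====
-- stage 1 of Source B: the partition loop with state (segments, cur); cur.append = cur ++ [line]
def mkSegs : List String → List String → List (List String)
  | [], cur => if cur.isEmpty then [] else [cur]
  | l :: rest, cur =>
    let cur2 := cur ++ [l]
    if PySem.Str.endswith l "." then cur2 :: mkSegs rest [] else mkSegs rest cur2

-- stage 2 of Source B: out.append(seg[0].capitalize()); out.extend(lower over seg[1:])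
-- (segments produced by mkSegs are never empty; [] case is a totality guard)
def formatSeg (seg : List String) : List String :=
  match seg with
  | [] => []
  | h :: t => pyCapitalize h :: t.map PySem.Str.lower

def format_and_clean_text_alt (input_text : String) (format_text : Bool) : String :=
  let stripped := ((PySem.Str.split? (PySem.Str.strip input_text) "\n").getD []).map PySem.Str.strip
  if format_text = false then PySem.Str.join " " stripped
  else PySem.Str.join " " ((mkSegs stripped []).flatMap formatSeg)

-- ===== PRECONDITION & SPEC =====
def Spec_format_and_clean_text (input_text : String) (format_text : Bool) (out : String) : Prop := out = format_and_clean_text_alt input_text format_text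
instance (input_text : String) (format_text : Bool) (out : String) : Decidable (Spec_format_and_clean_text input_text format_text out) := by unfold Spec_format_and_clean_text; infer_instance

-- ===== CLAIM (what is proved, stated in full; the proofs are below) =====
def Claim_equal_format_and_clean_text : Prop := ∀ (input_text : String) (format_text : Bool), Dom_format_and_clean_text input_text format_text → Spec_format_and_clean_text input_text format_text (format_and_clean_text input_text format_text)

-- ===== LEMMAS AND PROOFS =====

theorem lowerChar_eq_dot_iff (c : Char) : PySem.Chars.lowerChar c = '.' ↔ c = '.' := by
  unfold PySem.Chars.lowerChar
  split_ifs with h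
  · simp only [PySem.Chars.isupper, Bool.and_eq_true, decide_eq_true_eq] at h
    have h1 : 65 ≤ c.toNat := Fin.mk_le_mk.mp h.1
    have h2 : c.toNat ≤ 90 := Fin.mk_le_mk.mp h.2
    constructor
    · intro he
      have hv : (c.toNat + 32).isValidChar := Or.inl (by omega)
      have := congrArg Char.toNat he
      rw [Char.toNat_ofNat, if_pos hv] at this
      have hd : ('.' : Char).toNat = 46 := rfl
      rw [hd] at this
      omega
    · intro he; subst he
      have hd : ('.' : Char).toNat = 46 := rfl
      omega
  · exact Iff.rfl

theorem upperChar_eq_dot_iff (c : Char) : PySem.Chars.upperChar c = '.' ↔ c = '.' := by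
  unfold PySem.Chars.upperChar
  split_ifs with h
  · simp only [PySem.Chars.islower, Bool.and_eq_true, decide_eq_true_eq] at h
    have h1 : 97 ≤ c.toNat := Fin.mk_le_mk.mp h.1
    have h2 : c.toNat ≤ 122 := Fin.mk_le_mk.mp h.2
    constructor
    · intro he
      have hv : (c.toNat - 32).isValidChar := Or.inl (by omega)
      have := congrArg Char.toNat he
      rw [Char.toNat_ofNat, if_pos hv] at this
      have hd : ('.' : Char).toNat = 46 := rfl
      rw [hd] at this
      omega
    · intro he; subst he
      have hd : ('.' : Char).toNat = 46 := rfl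
      omega
  · exact Iff.rfl

theorem endswith_singleton (cs : List Char) (d : Char) :
    PySem.Chars.endswith cs [d] = decide (cs.getLast? = some d) := by
  unfold PySem.Chars.endswith
  rcases Decidable.em (cs.getLast? = some d) with h | h
  · obtain ⟨ys, rfl⟩ := List.getLast?_eq_some_iff.mp h
    simp [List.isSuffixOf_iff_suffix, h]
  · simp only [h, decide_false]
    rw [Bool.eq_false_iff]
    intro hc
    rw [List.isSuffixOf_iff_suffix] at hc
    obtain ⟨t, rfl⟩ := hc
    simp at h

theorem getLast?_lower (cs : List Char) :
    (PySem.Chars.lower cs).getLast? = Option.map PySem.Chars.lowerChar cs.getLast? := by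
  simp [PySem.Chars.lower, List.getLast?_map]

theorem endsDot_lower (s : String) :
    PySem.Str.endswith (PySem.Str.lower s) "." = PySem.Str.endswith s "." := by
  simp only [PySem.Str.endswith_eq, PySem.Str.toList_lower]
  have hd : (".").toList = ['.'] := rfl
  rw [hd, endswith_singleton, endswith_singleton, getLast?_lower]
  cases h : s.toList.getLast? with
  | none => rfl
  | some c => simp [lowerChar_eq_dot_iff]

theorem endsDot_cap (s : String) :
    PySem.Str.endswith (pyCapitalize s) "." = PySem.Str.endswith s "." := by
  simp only [PySem.Str.endswith_eq]
  have hd : (".").toList = ['.'] := rfl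
  rw [hd]
  unfold pyCapitalize
  cases hcl : s.toList with
  | nil => rfl
  | cons c rest =>
    change PySem.Chars.endswith (String.ofList (PySem.Chars.upperChar c :: PySem.Chars.lower rest)).toList ['.'] = _
    rw [String.toList_ofList, endswith_singleton, endswith_singleton]
    cases rest with
    | nil => simp [PySem.Chars.lower, upperChar_eq_dot_iff]
    | cons b t =>
      rw [show PySem.Chars.lower (b :: t) = PySem.Chars.lowerChar b :: PySem.Chars.lower t from rfl]
      rw [List.getLast?_cons_cons, List.getLast?_cons_cons,
        show PySem.Chars.lowerChar b :: PySem.Chars.lower t = PySem.Chars.lower (b :: t) from rfl,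
        getLast?_lower]
      cases h : (b :: t).getLast? with
      | none => simp at h
      | some x => simp [lowerChar_eq_dot_iff]

theorem loopA_false (ls : List String) (k : Int) (b : Bool) :
    loopA false ls k b = ls.map PySem.Str.strip := by
  induction ls generalizing k b with
  | nil => rfl
  | cons l rest ih => simp [loopA, ih]

-- the canonical recursive form of A's formatting pass on already-stripped lines
def fmtLines (cap : Bool) : List String → List String
  | [] => []
  | l :: rest =>
    (if cap then pyCapitalize l else PySem.Str.lower l) ::
      fmtLines (PySem.Str.endswith l ".") rest

theorem loopA_fmt (ls : List String) (k : Int) (flag : Bool) (hk : 1 ≤ k) :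
    loopA true ls k flag = fmtLines flag (ls.map PySem.Str.strip) := by
  induction ls generalizing k flag with
  | nil => rfl
  | cons l rest ih =>
    have hk0 : (k == 0) = false := by simp; omega
    cases flag with
    | true =>
      have step : loopA true (l :: rest) k true =
          pyCapitalize (PySem.Str.strip l) ::
            loopA true rest (k + 1)
              (PySem.Str.endswith (pyCapitalize (PySem.Str.strip l)) ".") := rfl
      rw [step, endsDot_cap]
      exact congrArg (List.cons _) (ih (k + 1) _ (by omega))
    | false =>
      have step : loopA true (l :: rest) k false =
          (if (k == 0) then pyCapitalize (PySem.Str.strip l)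
            else PySem.Str.lower (PySem.Str.strip l)) ::
            loopA true rest (k + 1)
              (PySem.Str.endswith (if (k == 0) then pyCapitalize (PySem.Str.strip l)
                else PySem.Str.lower (PySem.Str.strip l)) ".") := rfl
      rw [step, hk0]
      simp only [Bool.false_eq_true, if_false]
      rw [endsDot_lower]
      exact congrArg (List.cons _) (ih (k + 1) _ (by omega))

theorem loopA_top (ls : List String) :
    loopA true ls 0 false = fmtLines true (ls.map PySem.Str.strip) := by
  cases ls with
  | nil => rfl
  | cons l rest =>
    have step : loopA true (l :: rest) 0 false =
        pyCapitalize (PySem.Str.strip l) ::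
          loopA true rest 1 (PySem.Str.endswith (pyCapitalize (PySem.Str.strip l)) ".") := rfl
    rw [step, endsDot_cap, loopA_fmt rest 1 _ le_rfl]
    rfl

-- the segment decomposition computes exactly the canonical pass
theorem segs_fmt (ls : List String) :
    (∀ c0 ct, (mkSegs ls (c0 :: ct)).flatMap formatSeg =
        pyCapitalize c0 :: (ct.map PySem.Str.lower ++ fmtLines false ls)) ∧
      (mkSegs ls []).flatMap formatSeg = fmtLines true ls := by
  induction ls with
  | nil =>
    refine ⟨fun c0 ct => ?_, rfl⟩
    simp [mkSegs, formatSeg, fmtLines]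
  | cons l rest ih =>
    constructor
    · intro c0 ct
      simp only [mkSegs, List.cons_append]
      have hus : PySem.Str.endswith l "." = PySem.Chars.endswith l.toList ['.'] := rfl
      cases hE : PySem.Str.endswith l "." with
      | true =>
        rw [if_pos rfl]
        simp only [List.flatMap_cons, formatSeg, List.map_append, ih.2, fmtLines, hE]
        simp
      | false =>
        rw [if_neg (by simp [hE])]
        rw [ih.1 c0 (ct ++ [l])]
        simp [fmtLines, hE, hus ▸ hE]
    · simp only [mkSegs, List.nil_append]
      have hus : PySem.Str.endswith l "." = PySem.Chars.endswith l.toList ['.'] := rfl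
      cases hE : PySem.Str.endswith l "." with
      | true =>
        rw [if_pos rfl]
        simp [List.flatMap_cons, formatSeg, fmtLines, hE, hus ▸ hE, ih.2]
      | false =>
        rw [if_neg (by simp [hE])]
        rw [ih.1 l []]
        simp [fmtLines, hE, hus ▸ hE]

-- ===== VERDICT (by name: the statement is the Claim_ definition above) =====
theorem format_and_clean_text_spec : Claim_equal_format_and_clean_text := by
  intro input_text format_text _
  unfold Spec_format_and_clean_text format_and_clean_text format_and_clean_text_alt
  by_cases he : input_text = ""
  · subst he; cases format_text <;> decide
  · rw [if_neg (by simpa using he)]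
    cases format_text with
    | false => simp only [loopA_false]; simp
    | true => simp [loopA_top, (segs_fmt _).2]
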